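-- pv_equiv track=rewrite | github.com/CriticalHex/CodeQuest | mayan_math/mayan_math.py | itom
-- ===== SOURCE A (Python) =====
-- def itom(num: int):
--     values = [
--         "0",
--         ".",
--         "..",
--         "...",
--         "....",
--         "-",
--         ".-",
--         "..-",
--         "...-",
--         "....-",
--         "--",
--         ".--",
--         "..--",
--         "...--",
--         "....--",
--         "---",
--         ".---",
--         "..---",
--         "...---",
--         "....---",
--     ]
--     output = ""
--     for digit in range(3, -1, -1):
--         max_at_digit = 20**digit
--         for i in range(len(values), -1, -1):
--             if num - (i * max_at_digit) >= 0:
--                 num -= i * max_at_digit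
--                 if values[i] != "0" or output:
--                     output += f" {values[i]}"
--                     break
--     return output.lstrip()
-- ===== SOURCE B (Python) =====
-- def itom(num: int):
--     values = [
--         "0", ".", "..", "...", "....",
--         "-", ".-", "..-", "...-", "....-",
--         "--", ".--", "..--", "...--", "....--",
--         "---", ".---", "..---", "...---", "....---",
--     ]
--     if num < 0:
--         return ""
--     pieces = []
--     for place in (8000, 400, 20, 1):
--         d, num = divmod(num, place)
--         if d or pieces:
--             pieces.append(values[d])
--     return " ".join(pieces)
-- ===== Notes on version B (the rewrite author's own statement) =====
-- stated objective: simpler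
-- what changed: B extracts each base-20 digit directly with divmod over the four place values instead of A's descending 21-step linear scan per place, and builds the pieces list joined with ' ' instead of accumulating a string and lstrip-ing it.
import Mathlib
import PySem

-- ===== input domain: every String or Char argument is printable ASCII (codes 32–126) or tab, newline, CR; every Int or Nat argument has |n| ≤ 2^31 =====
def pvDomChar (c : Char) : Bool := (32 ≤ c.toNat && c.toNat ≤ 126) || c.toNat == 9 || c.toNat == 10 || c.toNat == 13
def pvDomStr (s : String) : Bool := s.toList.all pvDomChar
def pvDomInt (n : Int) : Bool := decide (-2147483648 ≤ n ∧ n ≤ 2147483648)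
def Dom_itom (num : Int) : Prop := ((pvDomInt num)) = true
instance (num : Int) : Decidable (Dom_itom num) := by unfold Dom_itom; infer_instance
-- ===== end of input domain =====

-- B replaces A's repeated descending linear scan for the digit at each place by direct
-- base-20 digit extraction with divmod (objective: simpler).

-- ===== PORT A =====
-- the `values` list of the Python source (carried by both Pythons, so shared by both ports)
def itomValues : List String :=
  ["0", ".", "..", "...", "....",
   "-", ".-", "..-", "...-", "....-",
   "--", ".--", "..--", "...--", "....--",
   "---", ".---", "..---", "...---", "....---"]

-- inner loop `for i in range(len(values), -1, -1)` with its break;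
-- `values[i]` is pyGetD: the IndexError at i = 20 is exactly what Pre_itom excludes
def itomInner : List Int → Int → Int → String → Int × String
  | [], num, _, output => (num, output)
  | i :: rest, num, maxAtDigit, output =>
    if num - i * maxAtDigit ≥ 0 then
      let num' := num - i * maxAtDigit
      if PySem.List.pyGetD itomValues i "" ≠ "0" ∨ output ≠ "" then
        (num', output ++ " " ++ PySem.List.pyGetD itomValues i "")
      else itomInner rest num' maxAtDigit output
    else itomInner rest num maxAtDigit output

-- outer loop `for digit in range(3, -1, -1)` (digit ≥ 0 there, so 20**digit = 20 ^ digit.toNat)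
def itomOuter : List Int → Int → String → String
  | [], _, output => output
  | d :: rest, num, output =>
    let maxAtDigit : Int := (20 : Int) ^ d.toNat
    let st := itomInner (PySem.List.pyRange (PySem.List.len itomValues) (-1) (-1)) num maxAtDigit output
    itomOuter rest st.1 st.2

def itom (num : Int) : String :=
  PySem.Str.lstrip (itomOuter (PySem.List.pyRange 3 (-1) (-1)) num "")

-- ===== PORT B =====
def itom_alt (num : Int) : String :=
  if num < 0 then "" else
  let st := ([8000, 400, 20, 1] : List Int).foldl
    (fun (acc : List String × Int) place =>
      let d := PySem.Int.floordiv acc.2 place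
      let r := PySem.Int.mod acc.2 place
      (if d ≠ 0 ∨ acc.1 ≠ [] then acc.1 ++ [PySem.List.pyGetD itomValues d ""] else acc.1, r))
    ([], num)
  PySem.Str.join " " st.1

-- ===== PRECONDITION & SPEC =====
-- A raises IndexError (values[20]) whenever num ≥ 20 * 20**3 = 160000; those inputs are excluded.
def Pre_itom (num : Int) : Prop := num < 160000
instance (num : Int) : Decidable (Pre_itom num) := by unfold Pre_itom; infer_instance
def pvWitness_itom : Int := (8421)

def Spec_itom (num : Int) (out : String) : Prop := out = itom_alt num
instance (num : Int) (out : String) : Decidable (Spec_itom num out) := by unfold Spec_itom; infer_instance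

-- ===== CLAIM (what is proved, stated in full; the proofs are below) =====
def Claim_equal_itom : Prop := ∀ (num : Int), Dom_itom num → Pre_itom num → Spec_itom num (itom num)

-- ===== LEMMAS AND PROOFS =====

-- `values[q]` in total form, as both ports read it
def itomVal (q : Int) : String := PySem.List.pyGetD itomValues q ""

-- one step of A's per-place accumulation (what the inner scan amounts to)
def stepA (output : String) (q : Int) : String :=
  if q = 0 ∧ output = "" then output else output ++ " " ++ itomVal q

-- one step of B's `pieces` accumulation
def stepB (ps : List String) (q : Int) : List String :=
  if q ≠ 0 ∨ ps ≠ [] then ps ++ [itomVal q] else ps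

lemma itomVal_eq_zero_iff (q : Int) (h0 : 0 ≤ q) (h1 : q < 20) :
    (itomVal q = "0") ↔ q = 0 := by
  interval_cases q <;> simp [itomVal, itomValues, PySem.List.pyGetD]

lemma lstrip_space_itomVal (q : Int) (h0 : 0 ≤ q) (h1 : q < 20) (rest : List Char) :
    PySem.Chars.lstrip (' ' :: ((itomVal q).toList ++ rest)) = (itomVal q).toList ++ rest := by
  interval_cases q <;>
    simp [itomVal, itomValues, PySem.List.pyGetD, PySem.Chars.lstrip, List.dropWhile,
      PySem.Chars.isspace]

lemma lstrip_space_itomVal' (q : Int) (h0 : 0 ≤ q) (h1 : q < 20) :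
    PySem.Chars.lstrip (' ' :: (itomVal q).toList) = (itomVal q).toList := by
  simpa using lstrip_space_itomVal q h0 h1 []

-- the inner scan over the countdown [k, k-1, …, 0] extracts the base-`p` digit
lemma itomInner_spec (k : Nat) (hk : k ≤ 19) :
    ∀ (num p : Int) (output : String), 0 < p → 0 ≤ num → num < ((k : Int) + 1) * p →
    itomInner (PySem.List.pyRange (k : Int) (-1) (-1)) num p output =
      (PySem.Int.mod num p, stepA output (PySem.Int.floordiv num p)) := by
  induction k with
  | zero =>
    intro num p output hp h0 hlt
    rw [PySem.List.pyRange_neg_one_cons (by norm_num)]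
    rw [PySem.List.pyRange_neg_one_eq_nil (by norm_num)]
    have hfd : PySem.Int.floordiv num p = 0 := by
      rw [PySem.Int.floordiv_eq_iff_of_pos hp]; constructor <;> omega
    have hmod : PySem.Int.mod num p = num := by
      rw [PySem.Int.mod_eq_emod_of_pos hp, Int.emod_eq_of_lt h0 (by omega)]
    simp only [itomInner, stepA, hfd, hmod]
    have hv : (PySem.List.pyGetD itomValues (0:Int) "" : String) = "0" := by
      simp [itomValues, PySem.List.pyGetD]
    by_cases ho : output = ""
    · simp [ho, hv, h0]
    · simp [ho, hv, h0, itomVal]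
  | succ k ih =>
    intro num p output hp h0 hlt
    rw [show ((k+1 : Nat) : Int) = (k : Int) + 1 by push_cast; ring]
    rw [PySem.List.pyRange_neg_one_cons (by omega)]
    simp only [itomInner]
    by_cases hge : num - ((k:Int)+1) * p ≥ 0
    · have hfd : PySem.Int.floordiv num p = (k:Int)+1 := by
        rw [PySem.Int.floordiv_eq_iff_of_pos hp]
        constructor
        · omega
        · exact_mod_cast hlt
      have hne : PySem.List.pyGetD itomValues ((k:Int)+1) "" ≠ "0" := by
        have h19 : ((k:Int)+1) < 20 := by
          have : (k : Int) ≤ 18 := by exact_mod_cast (by omega : k ≤ 18)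
          omega
        have := itomVal_eq_zero_iff ((k:Int)+1) (by omega) h19
        simp only [itomVal] at this
        rw [Ne, this]; omega
      have hmod : PySem.Int.mod num p = num - ((k:Int)+1) * p := by
        have := PySem.Int.floordiv_mul_add_mod num p
        rw [hfd] at this; omega
      have hkne : ¬(((k:Int)+1 = 0) ∧ output = "") := by rintro ⟨h, -⟩; omega
      rw [if_pos hge, if_pos (Or.inl hne), stepA, hfd, hmod, if_neg hkne, itomVal]
    · rw [show ((k:Int) + 1 - 1) = (k:Int) by ring]
      rw [if_neg hge]
      exact ih (by omega) num p output hp h0 (by omega)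

-- at the top of the scan, i = 20 never fires under num < 20*p
lemma itomInner_top (num p : Int) (output : String) (hp : 0 < p) (h0 : 0 ≤ num)
    (h : num < 20 * p) :
    itomInner (PySem.List.pyRange (PySem.List.len itomValues) (-1) (-1)) num p output =
      (PySem.Int.mod num p, stepA output (PySem.Int.floordiv num p)) := by
  rw [show PySem.List.len itomValues = (20 : Int) by decide]
  rw [PySem.List.pyRange_neg_one_cons (by norm_num)]
  simp only [itomInner]
  rw [if_neg (by omega)]
  rw [show ((20:Int) - 1) = ((19 : Nat) : Int) by norm_num]
  exact itomInner_spec 19 (by omega) num p output hp h0 (by push_cast; omega)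

-- with a negative num no branch of the inner scan ever fires
lemma itomInner_neg (lst : List Int) (hlst : ∀ i ∈ lst, 0 ≤ i) :
    ∀ (num p : Int) (output : String), 0 < p → num < 0 →
    itomInner lst num p output = (num, output) := by
  induction lst with
  | nil => intro num p output hp hneg; rfl
  | cons i rest ih =>
    intro num p output hp hneg
    have hi : 0 ≤ i := hlst i (by simp)
    simp only [itomInner]
    rw [if_neg (by nlinarith)]
    exact ih (fun j hj => hlst j (by simp [hj])) num p output hp hneg

lemma itom_of_neg (num : Int) (hneg : num < 0) : itom num = "" := by
  have hmem : ∀ i ∈ PySem.List.pyRange (PySem.List.len itomValues) (-1) (-1), (0:Int) ≤ i := by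
    rw [show PySem.List.len itomValues = (20 : Int) by decide]
    intro i hi
    rw [PySem.List.mem_pyRange_neg_one] at hi
    omega
  have hin : ∀ (p : Int), 0 < p → ∀ output,
      itomInner (PySem.List.pyRange (PySem.List.len itomValues) (-1) (-1)) num p output
        = (num, output) :=
    fun p hp output => itomInner_neg _ hmem num p output hp hneg
  rw [itom, show PySem.List.pyRange 3 (-1) (-1) = [3, 2, 1, 0] by decide]
  simp only [itomOuter]
  rw [hin _ (by norm_num), hin _ (by norm_num), hin _ (by norm_num), hin _ (by norm_num)]
  show PySem.Str.lstrip "" = ""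
  decide

-- B's fold, unfolded into the four stepB applications
lemma itom_alt_eq (num : Int) (h0 : 0 ≤ num) :
    itom_alt num =
      PySem.Str.join " "
        (stepB (stepB (stepB (stepB [] (PySem.Int.floordiv num 8000))
            (PySem.Int.floordiv (PySem.Int.mod num 8000) 400))
          (PySem.Int.floordiv (PySem.Int.mod (PySem.Int.mod num 8000) 400) 20))
        (PySem.Int.floordiv (PySem.Int.mod (PySem.Int.mod (PySem.Int.mod num 8000) 400) 20) 1)) := by
  rw [itom_alt, if_neg (by omega)]
  simp only [List.foldl_cons, List.foldl_nil, stepB, itomVal]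

-- digit bounds
lemma fd_bounds (n p : Int) (hp : 0 < p) (h0 : 0 ≤ n) (h : n < 20 * p) :
    0 ≤ PySem.Int.floordiv n p ∧ PySem.Int.floordiv n p < 20 := by
  constructor
  · rw [PySem.Int.le_floordiv_iff_mul_le hp]; omega
  · rw [PySem.Int.floordiv_lt_iff_lt_mul hp]; omega

-- the two renderings from the same four digits agree
lemma render_eq (a b c d : Int)
    (ha0 : 0 ≤ a) (ha1 : a < 20) (hb0 : 0 ≤ b) (hb1 : b < 20)
    (hc0 : 0 ≤ c) (hc1 : c < 20) (hd0 : 0 ≤ d) (hd1 : d < 20) :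
    PySem.Str.lstrip (stepA (stepA (stepA (stepA "" a) b) c) d) =
    PySem.Str.join " " (stepB (stepB (stepB (stepB [] a) b) c) d) := by
  by_cases ha : a = 0
  · by_cases hb : b = 0
    · by_cases hc : c = 0
      · by_cases hd : d = 0
        · simp [stepA, stepB, ha, hb, hc, hd]
          decide
        · -- first piece is digit d
          simp only [stepA, stepB, ha, hb, hc, hd, and_self, ite_true, not_false_iff, false_and, ite_false, true_or, ne_eq]
          apply String.toList_inj.mp
          simp only [PySem.Str.toList_lstrip, PySem.Str.toList_join,
            String.toList_append, List.nil_append, List.cons_append,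
            show (" ".toList) = [' '] by decide, show ("" : String).toList = [] from rfl]
          rw [lstrip_space_itomVal' d hd0 hd1]
          simp [PySem.Chars.join_singleton]
      · -- first piece is digit c
        simp [stepA, stepB, ha, hb, hc]
        apply String.toList_inj.mp
        simp only [PySem.Str.toList_lstrip, PySem.Str.toList_join, List.map,
          String.toList_append, List.nil_append, List.cons_append, List.append_assoc,
          show (" ".toList) = [' '] by decide]
        rw [lstrip_space_itomVal c hc0 hc1]
        simp [PySem.Chars.join_cons_cons, PySem.Chars.join_singleton]
    · -- first piece is digit b
      simp [stepA, stepB, ha, hb]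
      apply String.toList_inj.mp
      simp only [PySem.Str.toList_lstrip, PySem.Str.toList_join, List.map,
        String.toList_append, List.nil_append, List.cons_append, List.append_assoc,
        show (" ".toList) = [' '] by decide]
      rw [lstrip_space_itomVal b hb0 hb1]
      simp [PySem.Chars.join_cons_cons, PySem.Chars.join_singleton]
  · -- first piece is digit a
    simp [stepA, stepB, ha]
    apply String.toList_inj.mp
    simp only [PySem.Str.toList_lstrip, PySem.Str.toList_join, List.map,
      String.toList_append, List.nil_append, List.cons_append, List.append_assoc,
      show (" ".toList) = [' '] by decide]
    rw [lstrip_space_itomVal a ha0 ha1]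
    simp [PySem.Chars.join_cons_cons, PySem.Chars.join_singleton]

-- ===== VERDICT (by name: the statement is the Claim_ definition above) =====
theorem itom_spec : Claim_equal_itom := by
  intro num hdom hpre
  unfold Spec_itom
  by_cases hneg : num < 0
  · rw [itom_of_neg num hneg, itom_alt, if_pos hneg]
  · replace hneg : 0 ≤ num := not_lt.mp hneg
    have hpre' : num < 160000 := hpre
    -- A's outer loop, one place at a time
    have hn1 : 0 ≤ PySem.Int.mod num 8000 ∧ PySem.Int.mod num 8000 < 8000 :=
      ⟨PySem.Int.mod_nonneg num (by norm_num), PySem.Int.mod_lt num (by norm_num)⟩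
    have hn2 : 0 ≤ PySem.Int.mod (PySem.Int.mod num 8000) 400 ∧
        PySem.Int.mod (PySem.Int.mod num 8000) 400 < 400 :=
      ⟨PySem.Int.mod_nonneg _ (by norm_num), PySem.Int.mod_lt _ (by norm_num)⟩
    have hn3 : 0 ≤ PySem.Int.mod (PySem.Int.mod (PySem.Int.mod num 8000) 400) 20 ∧
        PySem.Int.mod (PySem.Int.mod (PySem.Int.mod num 8000) 400) 20 < 20 :=
      ⟨PySem.Int.mod_nonneg _ (by norm_num), PySem.Int.mod_lt _ (by norm_num)⟩
    rw [itom, show PySem.List.pyRange 3 (-1) (-1) = [3, 2, 1, 0] by decide]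
    simp only [itomOuter]
    rw [show ((20:Int) ^ (Int.toNat 3)) = 8000 by decide,
        show ((20:Int) ^ (Int.toNat 2)) = 400 by decide,
        show ((20:Int) ^ (Int.toNat 1)) = 20 by decide,
        show ((20:Int) ^ (Int.toNat 0)) = 1 by decide]
    rw [itomInner_top num 8000 "" (by norm_num) hneg (by omega)]
    rw [itomInner_top _ 400 _ (by norm_num) hn1.1 (by omega)]
    rw [itomInner_top _ 20 _ (by norm_num) hn2.1 (by omega)]
    rw [itomInner_top _ 1 _ (by norm_num) hn3.1 (by omega)]
    rw [itom_alt_eq num hneg]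
    exact render_eq _ _ _ _
      (fd_bounds num 8000 (by norm_num) hneg (by omega)).1
      (fd_bounds num 8000 (by norm_num) hneg (by omega)).2
      (fd_bounds _ 400 (by norm_num) hn1.1 (by omega)).1
      (fd_bounds _ 400 (by norm_num) hn1.1 (by omega)).2
      (fd_bounds _ 20 (by norm_num) hn2.1 (by omega)).1
      (fd_bounds _ 20 (by norm_num) hn2.1 (by omega)).2
      (fd_bounds _ 1 (by norm_num) hn3.1 (by omega)).1
      (fd_bounds _ 1 (by norm_num) hn3.1 (by omega)).2
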